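-- pv_equiv track=rewrite | github.com/UKGANG/Leetcode | other/ScoreboardInferenceChapter2.py | getMinProblemCount
-- ===== SOURCE A (Python) =====
-- from typing import List
-- from typing import List
--
-- def getMinProblemCount(N: int, S: List[int]) -> int:
--     S.sort()
--     res = S[-1] // 3
--     if S[-1] % 3 == 0:
--         return res + int(any([s % 3 for s in S]))
--     if S[-1] % 3 == 1 and S[0] > 1 and S[-2] + 1 != S[-1]:
--         return res + 1
--     return res + int(any([s % 3 == 1 for s in S])) + int(any([s % 3 == 2 for s in S]))
-- ===== SOURCE B (Python) =====
-- def getMinProblemCount(N, S):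
--     # Single linear pass: track max, second max (with multiplicity), min,
--     # and whether any score has residue 1 or 2 mod 3.  No sorting; does not
--     # mutate S (A sorts it in place; only the return value is compared).
--     mx = sec = mn = None
--     has1 = has2 = False
--     for s in S:
--         if mn is None or s < mn:
--             mn = s
--         if mx is None or s > mx:
--             sec, mx = mx, s
--         elif sec is None or s > sec:
--             sec = s
--         r = s % 3
--         if r == 1:
--             has1 = True
--         elif r == 2:
--             has2 = True
--     res = mx // 3
--     r = mx % 3
--     if r == 0:
--         return res + (1 if (has1 or has2) else 0)
--     if r == 1 and mn > 1 and (sec is None or sec + 1 != mx):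
--         return res + 1
--     return res + (1 if has1 else 0) + (1 if has2 else 0)
-- ===== Notes on version B (the rewrite author's own statement) =====
-- stated objective: faster
-- what changed: Replaced A's sort-then-index computation by a single linear pass that tracks the max, second max, min and the two mod-3 residue flags; B also does not mutate S (A sorts it in place).
import Mathlib
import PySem

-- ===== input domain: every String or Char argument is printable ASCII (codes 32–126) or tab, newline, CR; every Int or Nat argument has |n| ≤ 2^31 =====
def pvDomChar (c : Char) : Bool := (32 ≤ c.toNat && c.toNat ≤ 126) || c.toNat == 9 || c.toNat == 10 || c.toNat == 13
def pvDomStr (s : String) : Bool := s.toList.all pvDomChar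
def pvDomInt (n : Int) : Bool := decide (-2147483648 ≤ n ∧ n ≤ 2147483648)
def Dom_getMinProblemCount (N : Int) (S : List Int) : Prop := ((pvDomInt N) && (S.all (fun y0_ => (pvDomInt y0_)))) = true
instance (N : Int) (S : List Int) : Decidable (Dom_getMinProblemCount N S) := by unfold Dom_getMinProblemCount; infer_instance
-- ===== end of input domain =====

-- B replaces A's sort-then-index computation by one linear pass tracking max, second max, min
-- and the two mod-3 residue flags (measured faster). A sorts S in place; B does not mutate S —
-- the equivalence proved here is about the return value only.

-- ===== PORT A =====
def getMinProblemCount (N : Int) (S : List Int) : Int :=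
  let T := PySem.List.sorted S (fun x => x) false     -- S.sort()
  let res := PySem.Int.floordiv (PySem.List.pyGetD T (-1) 0) 3
  if PySem.Int.mod (PySem.List.pyGetD T (-1) 0) 3 = 0 then
    res + (if T.any (fun s => decide (PySem.Int.mod s 3 ≠ 0)) then 1 else 0)
  else if PySem.Int.mod (PySem.List.pyGetD T (-1) 0) 3 = 1 ∧ 1 < PySem.List.pyGetD T 0 0 ∧
      PySem.List.pyGetD T (-2) 0 + 1 ≠ PySem.List.pyGetD T (-1) 0 then
    res + 1
  else
    res + (if T.any (fun s => decide (PySem.Int.mod s 3 = 1)) then 1 else 0)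
        + (if T.any (fun s => decide (PySem.Int.mod s 3 = 2)) then 1 else 0)

-- ===== PORT B =====
-- loop state of Source B's single pass: mx, sec, mn, has1, has2
structure AltSt where
  mx : Option Int
  sec : Option Int
  mn : Option Int
  h1 : Bool
  h2 : Bool
deriving DecidableEq

-- `if mx is None or s > mx: sec, mx = mx, s  elif sec is None or s > sec: sec = s`
def top2 (mx sec : Option Int) (s : Int) : Option Int × Option Int :=
  match mx with
  | none => (some s, mx)
  | some m =>
    if s > m then (some s, some m)
    else match sec with
      | none => (some m, some s)
      | some c => if s > c then (some m, some s) else (some m, some c)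

-- `if mn is None or s < mn: mn = s`
def minUpd (mn : Option Int) (s : Int) : Option Int :=
  match mn with
  | none => some s
  | some m => if s < m then some s else some m

-- one iteration of Source B's loop body
def altStep (st : AltSt) (s : Int) : AltSt :=
  { mx := (top2 st.mx st.sec s).1
    sec := (top2 st.mx st.sec s).2
    mn := minUpd st.mn s
    h1 := if PySem.Int.mod s 3 = 1 then true else st.h1
    h2 := if PySem.Int.mod s 3 = 1 then st.h2 else if PySem.Int.mod s 3 = 2 then true else st.h2 }

def getMinProblemCount_alt (N : Int) (S : List Int) : Int :=
  let st := S.foldl altStep ⟨none, none, none, false, false⟩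
  match st.mx, st.mn with
  | some mx, some mn =>
    let res := PySem.Int.floordiv mx 3
    let r := PySem.Int.mod mx 3
    if r = 0 then res + (if st.h1 || st.h2 then 1 else 0)
    else if r = 1 ∧ 1 < mn ∧
        (match st.sec with | none => true | some c => decide (c + 1 ≠ mx)) = true then
      res + 1
    else res + (if st.h1 then 1 else 0) + (if st.h2 then 1 else 0)
  | _, _ => 0   -- unreachable: S = [], where the Python B raises (excluded by Pre_)

-- ===== PRECONDITION & SPEC =====
-- Pre_ excludes exactly the inputs where A raises IndexError: the empty list (S[-1]), and
-- one-element lists whose single score s has s % 3 == 1 and s > 1 (A then evaluates S[-2]).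
def Pre_getMinProblemCount (N : Int) (S : List Int) : Prop :=
  S ≠ [] ∧ (2 ≤ S.length ∨ ∀ x ∈ S, ¬(PySem.Int.mod x 3 = 1 ∧ 1 < x))
instance (N : Int) (S : List Int) : Decidable (Pre_getMinProblemCount N S) := by
  unfold Pre_getMinProblemCount; infer_instance

def pvWitness_getMinProblemCount : Int × List Int := (1, [2, 5, 3])

def Spec_getMinProblemCount (N : Int) (S : List Int) (out : Int) : Prop :=
  out = getMinProblemCount_alt N S
instance (N : Int) (S : List Int) (out : Int) : Decidable (Spec_getMinProblemCount N S out) := by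
  unfold Spec_getMinProblemCount; infer_instance

-- ===== CLAIM (what is proved, stated in full; the proofs are below) =====
def Claim_equal_getMinProblemCount : Prop :=
  ∀ (N : Int) (S : List Int), Dom_getMinProblemCount N S → Pre_getMinProblemCount N S →
    Spec_getMinProblemCount N S (getMinProblemCount N S)

-- ===== LEMMAS AND PROOFS =====

lemma top2_rcomm (mx sec : Option Int) (a b : Int) :
    top2 (top2 mx sec a).1 (top2 mx sec a).2 b = top2 (top2 mx sec b).1 (top2 mx sec b).2 a := by
  rcases mx with _ | m <;> rcases sec with _ | c <;>
    simp only [top2] <;> split_ifs <;>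
    first
      | rfl
      | (simp_all; omega)
      | (simp only [top2]; split_ifs <;> simp_all <;> omega)

lemma minUpd_rcomm (mn : Option Int) (a b : Int) :
    minUpd (minUpd mn a) b = minUpd (minUpd mn b) a := by
  cases mn <;> simp only [minUpd] <;> split_ifs <;>
    (try simp only [minUpd]) <;> (try split_ifs) <;> simp_all <;> omega

lemma altStep_rcomm (st : AltSt) (a b : Int) :
    altStep (altStep st a) b = altStep (altStep st b) a := by
  cases st with
  | mk mx sec mn h1 h2 =>
    simp only [altStep, AltSt.mk.injEq]
    refine ⟨?_, ?_, minUpd_rcomm mn a b, ?_, ?_⟩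
    · exact congrArg Prod.fst (top2_rcomm mx sec a b)
    · exact congrArg Prod.snd (top2_rcomm mx sec a b)
    · split_ifs <;> rfl
    · split_ifs <;> rfl

-- mod-3 residues are 0, 1 or 2
lemma mod3_cases (x : Int) : PySem.Int.mod x 3 = 0 ∨ PySem.Int.mod x 3 = 1 ∨ PySem.Int.mod x 3 = 2 := by
  have h1 := PySem.Int.mod_nonneg x (b := 3) (by norm_num)
  have h2 := PySem.Int.mod_lt x (b := 3) (by norm_num)
  omega

-- the single pass over a nondecreasing list computes last / second-to-last / head / residue flags
lemma fold_sorted (T : List Int) (h : T.Pairwise (· ≤ ·)) :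
    T.foldl altStep ⟨none, none, none, false, false⟩ =
      ⟨T.getLast?, T.dropLast.getLast?, T.head?,
       T.any (fun s => decide (PySem.Int.mod s 3 = 1)),
       T.any (fun s => decide (PySem.Int.mod s 3 = 2))⟩ := by
  induction T using List.reverseRecOn with
  | nil => rfl
  | append_singleton xs x ih =>
    rw [List.foldl_append]
    rcases List.pairwise_append.mp h with ⟨hxs, -, hle⟩
    rw [ih hxs]
    have hlex : ∀ y ∈ xs, y ≤ x := fun y hy => hle y hy x (by simp)
    cases xs with
    | nil =>
      rcases mod3_cases x with h | h | h <;> simp [altStep, top2, minUpd, h] <;> omega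
    | cons y ys =>
      have hne2 : (y :: ys) ≠ [] := by simp
      have hgl : (y :: ys).getLast? = some ((y :: ys).getLast hne2) :=
        List.getLast?_eq_some_getLast hne2
      have hyx : y ≤ x := hlex y (by simp)
      have hLx : (y :: ys).getLast hne2 ≤ x := hlex _ (List.getLast_mem hne2)
      simp only [List.foldl_cons, List.foldl_nil]
      rw [hgl]
      simp only [altStep, AltSt.mk.injEq]
      refine ⟨?_, ?_, ?_, ?_, ?_⟩
      · rw [List.getLast?_concat]
        rcases hsec : (y :: ys).dropLast.getLast? with _ | c <;>
          simp only [top2] <;> split_ifs <;> simp_all <;> omega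
      · rw [List.dropLast_concat, hgl]
        rcases hsec : (y :: ys).dropLast.getLast? with _ | c
        · simp only [top2]; split_ifs <;> simp_all <;> omega
        · have hc : c ≤ x :=
            hlex c ((List.dropLast_sublist _).subset (List.mem_of_getLast? hsec))
          simp only [top2]; split_ifs <;> simp_all <;> omega
      · have hnx : ¬ x < y := by omega
        simp [minUpd, hnx, List.head?_append]
      · simp only [List.any_append, List.any_cons, List.any_nil]
        split_ifs <;> simp_all
      · simp only [List.any_append, List.any_cons, List.any_nil]
        split_ifs <;> simp_all

lemma any_ne_eq_or (T : List Int) :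
    (T.any fun s => decide (PySem.Int.mod s 3 ≠ 0)) =
      ((T.any fun s => decide (PySem.Int.mod s 3 = 1)) ||
       (T.any fun s => decide (PySem.Int.mod s 3 = 2))) := by
  induction T with
  | nil => rfl
  | cons t ts ih =>
    simp only [List.any_cons, ih]
    have h0 : (decide (PySem.Int.mod t 3 ≠ 0)) =
        (decide (PySem.Int.mod t 3 = 1) || decide (PySem.Int.mod t 3 = 2)) := by
      rcases mod3_cases t with h | h | h <;> rw [h] <;> decide
    rw [h0]
    cases hd1 : decide (PySem.Int.mod t 3 = 1) <;> cases hd2 : decide (PySem.Int.mod t 3 = 2) <;>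
      simp [Bool.or_assoc, Bool.or_comm, Bool.or_left_comm]

theorem getMinProblemCount_spec : Claim_equal_getMinProblemCount := by
  intro N S _ hPre
  obtain ⟨hSne, hrest⟩ := hPre
  have hperm : (PySem.List.sorted S (fun x => x) false).Perm S := PySem.List.sorted_perm S _ false
  have hpw : (PySem.List.sorted S (fun x => x) false).Pairwise (· ≤ ·) := by
    simpa using PySem.List.sorted_pairwise S (fun x => x)
  have hfold : S.foldl altStep ⟨none, none, none, false, false⟩
      = (PySem.List.sorted S (fun x => x) false).foldl altStep ⟨none, none, none, false, false⟩ :=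
    hperm.symm.foldl_eq' (fun x _ y _ z => altStep_rcomm z x y) _
  obtain ⟨t, ts, hT⟩ : ∃ t ts, PySem.List.sorted S (fun x => x) false = t :: ts := by
    rcases h' : PySem.List.sorted S (fun x => x) false with _ | ⟨a, b⟩
    · exact absurd ((PySem.List.sorted_eq_nil_iff S _ false).mp h') hSne
    · exact ⟨a, b, rfl⟩
  rw [hT] at hperm hpw hfold
  simp only [Spec_getMinProblemCount, getMinProblemCount, getMinProblemCount_alt]
  rw [hT, hfold, fold_sorted _ hpw]
  have hne2 : (t :: ts) ≠ [] := by simp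
  have hgl : (t :: ts).getLast? = some ((t :: ts).getLast hne2) :=
    List.getLast?_eq_some_getLast hne2
  have e1 : PySem.List.pyGetD (t :: ts) (-1) 0 = (t :: ts).getLast hne2 :=
    PySem.List.pyGetD_neg_one _ _ hne2
  have e2 : PySem.List.pyGetD (t :: ts) 0 0 = t := PySem.List.pyGetD_zero_cons _ _ _
  rw [hgl, e1, e2]
  simp only [List.head?_cons]
  by_cases h0 : PySem.Int.mod ((t :: ts).getLast hne2) 3 = 0
  · simp only [if_pos h0, any_ne_eq_or]
  · simp only [if_neg h0]
    cases ts with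
    | nil =>
      have hfor : ∀ x ∈ S, ¬(PySem.Int.mod x 3 = 1 ∧ 1 < x) := by
        rcases hrest with h2 | hfor
        · rw [← hperm.length_eq] at h2; simp at h2
        · exact hfor
      have ht : ¬(PySem.Int.mod t 3 = 1 ∧ 1 < t) :=
        hfor t (hperm.mem_iff.mp (by simp))
      have hLt : (t :: ([] : List Int)).getLast hne2 = t := rfl
      rw [hLt]
      split_ifs <;> first | rfl | (exact absurd ⟨by tauto, by tauto⟩ ht)
    | cons u us =>
      have e3 : PySem.List.pyGetD (t :: u :: us) (-2) 0
          = (t :: u :: us)[(t :: u :: us).length - 2] :=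
        PySem.List.pyGetD_neg_ofNat _ 2 0 (by norm_num) (by simp)
      have e4 : (t :: u :: us).dropLast.getLast?
          = some ((t :: u :: us)[(t :: u :: us).length - 2]) := by
        rw [List.getLast?_eq_getElem?, List.getElem?_dropLast]
        simp only [List.length_dropLast]
        rw [if_pos (by simp)]
        rw [List.getElem?_eq_getElem (by simp)]
        simp
      rw [e3, e4]
      simp only [decide_eq_true_eq]
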